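-- pv_equiv track=rewrite | github.com/BenKro/ToolboxForMentalCardgames | ECCGT/bayergroth.py | bilinearmap
-- ===== SOURCE A (Python) =====
-- def add_mod(a: int, b: int, order: int) -> int:
--     var = (a+b) % order
--     return var
--
-- def mul_mod(a: int, b: int, order: int) -> int:
--     var = (a * b) % order
--     return var
--
-- def exp_mod(a: int, b: int, order: int) -> int:
--     var = (a**b) % order
--     return var
--
-- def bilinearmap(f, h, y, order):
--     """Bilinear map: a = sum_{j=1}^{n}(f_j*h_j*y^j)
--
--     Args:
--         f (List[int]): list 1
--         h (List[int]): list 2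
--         y (int): challenge
--         order (int): order of elliptic curve subgroup
--
--     Returns:
--         int: solution from bilinear map
--     """
--     n = len(f)
--     assert (n == len(h))
--
--     var0 = 0
--
--     for j in range(n):
--         var1 = mul_mod(f[j], h[j], order)
--         var2 = exp_mod(y, j + 1, order)
--         var3 = mul_mod(var1, var2, order)
--
--         var0 = add_mod(var0, var3, order)
--
--     return var0
-- ===== SOURCE B (Python) =====
-- def bilinearmap(f, h, y, order):
--     """Bilinear map: a = sum_{j=1}^{n}(f_j*h_j*y^j) mod order.
--
--     Single O(n) pass: the power y^(j+1) mod order is maintained incrementally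
--     (one modular multiplication per step) instead of recomputing y**(j+1) on
--     full-size integers each iteration.
--     """
--     assert len(f) == len(h)
--     acc = 0
--     p = 1
--     for fj, hj in zip(f, h):
--         p = (p * y) % order
--         acc = (acc + fj * hj * p) % order
--     return acc
-- ===== Notes on version B (the rewrite author's own statement) =====
-- stated objective: faster
-- what changed: Instead of recomputing y**(j+1) from scratch on full-size integers every iteration and reducing each factor separately, B keeps one running power p = y^(j+1) mod order, updated by a single modular multiplication per step while folding over zip(f, h).
import Mathlib
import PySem

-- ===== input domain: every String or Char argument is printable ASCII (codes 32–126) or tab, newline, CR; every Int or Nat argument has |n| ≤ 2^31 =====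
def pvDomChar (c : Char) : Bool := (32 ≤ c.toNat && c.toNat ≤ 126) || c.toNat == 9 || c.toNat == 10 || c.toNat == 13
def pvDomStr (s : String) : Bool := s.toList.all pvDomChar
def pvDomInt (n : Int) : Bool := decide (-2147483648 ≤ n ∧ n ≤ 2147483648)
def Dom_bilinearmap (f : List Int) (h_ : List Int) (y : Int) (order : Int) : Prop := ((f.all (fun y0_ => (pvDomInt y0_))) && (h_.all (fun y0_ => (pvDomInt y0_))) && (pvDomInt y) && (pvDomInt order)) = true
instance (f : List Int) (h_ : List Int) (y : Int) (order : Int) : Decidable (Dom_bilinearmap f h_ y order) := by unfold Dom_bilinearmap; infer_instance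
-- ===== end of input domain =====

-- B replaces A's per-step bignum exponentiation y**(j+1) by one incrementally maintained,
-- modularly reduced running power: one O(n) pass (objective: faster, asymptotic).

-- ===== PORT A =====
def py_add_mod (a : Int) (b : Int) (order : Int) : Int := PySem.Int.mod (a + b) order
def py_mul_mod (a : Int) (b : Int) (order : Int) : Int := PySem.Int.mod (a * b) order
-- exp_mod: A only calls it with exponent j+1 ≥ 1, hence the Nat exponent (exact there)
def py_exp_mod (a : Int) (b : Nat) (order : Int) : Int := PySem.Int.mod (a ^ b) order

def bilinearmap (f : List Int) (h_ : List Int) (y : Int) (order : Int) : Int :=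
  (List.range f.length).foldl
    (fun var0 j =>
      let var1 := py_mul_mod (f.getD j 0) (h_.getD j 0) order
      let var2 := py_exp_mod y (j + 1) order
      let var3 := py_mul_mod var1 var2 order
      py_add_mod var0 var3 order)
    0

-- ===== PORT B =====
def bilinearmap_alt (f : List Int) (h_ : List Int) (y : Int) (order : Int) : Int :=
  ((f.zip h_).foldl
    (fun (st : Int × Int) fh =>
      let p := PySem.Int.mod (st.2 * y) order
      (PySem.Int.mod (st.1 + fh.1 * fh.2 * p) order, p))
    (0, 1)).1

-- ===== PRECONDITION & SPEC =====
-- Pre_ excludes exactly where the Python A raises: the assert (len(f) == len(h)) and the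
-- ZeroDivisionError of '% order' with order = 0, which is only reached when the loop runs.
def Pre_bilinearmap (f : List Int) (h_ : List Int) (y : Int) (order : Int) : Prop :=
  f.length = h_.length ∧ (f = [] ∨ order ≠ 0)
instance (f : List Int) (h_ : List Int) (y : Int) (order : Int) : Decidable (Pre_bilinearmap f h_ y order) := by unfold Pre_bilinearmap; infer_instance
def pvWitness_bilinearmap : List Int × List Int × Int × Int := ([1, 2], [3, 4], 5, 7)

def Spec_bilinearmap (f : List Int) (h_ : List Int) (y : Int) (order : Int) (out : Int) : Prop := out = bilinearmap_alt f h_ y order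
instance (f : List Int) (h_ : List Int) (y : Int) (order : Int) (out : Int) : Decidable (Spec_bilinearmap f h_ y order out) := by unfold Spec_bilinearmap; infer_instance

-- ===== CLAIM (what is proved, stated in full; the proofs are below) =====
def Claim_equal_bilinearmap : Prop := ∀ (f : List Int) (h_ : List Int) (y : Int) (order : Int), Dom_bilinearmap f h_ y order → Pre_bilinearmap f h_ y order → Spec_bilinearmap f h_ y order (bilinearmap f h_ y order)

-- ===== LEMMAS AND PROOFS =====

-- fmod absorption lemmas: an inner floor-mod may be dropped under an outer one
lemma fmod_absorb_mul_left (a b n : Int) : ((Int.fmod a n) * b).fmod n = (a * b).fmod n := by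
  rw [Int.mul_fmod, Int.fmod_fmod, ← Int.mul_fmod]

lemma fmod_absorb_mul_right (a b n : Int) : (a * (Int.fmod b n)).fmod n = (a * b).fmod n := by
  rw [Int.mul_fmod, Int.fmod_fmod, ← Int.mul_fmod]

lemma fmod_absorb_add_right (a b n : Int) : (a + (Int.fmod b n)).fmod n = (a + b).fmod n := by
  rw [Int.add_fmod, Int.fmod_fmod, ← Int.add_fmod]

lemma fmod_absorb_add_mul_right (a c x n : Int) :
    (a + c * (Int.fmod x n)).fmod n = (a + c * x).fmod n := by
  rw [← fmod_absorb_add_right (b := c * (Int.fmod x n)), fmod_absorb_mul_right,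
    fmod_absorb_add_right]

-- The heart of the proof: A's index loop (with the absolute power generalized to w*y^(j+1))
-- equals B's zip loop, for any carried running power p congruent to w mod order.
lemma loop_eq (y order : Int) :
    ∀ (f h_ : List Int) (w acc p : Int),
      f.length = h_.length →
      Int.fmod p order = Int.fmod w order →
      (List.range f.length).foldl
        (fun v0 j =>
          Int.fmod (v0 + Int.fmod (Int.fmod ((f.getD j 0) * (h_.getD j 0)) order *
            Int.fmod (w * y ^ (j + 1)) order) order) order) acc
      =
      ((f.zip h_).foldl
        (fun st fh =>
          (Int.fmod (st.1 + fh.1 * fh.2 * Int.fmod (st.2 * y) order) order,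
            Int.fmod (st.2 * y) order)) (acc, p)).1 := by
  intro f
  induction f with
  | nil => intro h_ w acc p hlen hp; simp
  | cons a f' ih =>
    intro h_ w acc p hlen hp
    cases h_ with
    | nil => simp at hlen
    | cons b h' =>
      have hlen' : f'.length = h'.length := by simpa using hlen
      have hq : Int.fmod (p * y) order = Int.fmod (w * y) order := by
        rw [Int.mul_fmod, hp, ← Int.mul_fmod]
      have hrw : ∀ j : Nat, w * y ^ (j + 1 + 1) = (w * y) * y ^ (j + 1) := by
        intro j; ring
      rw [List.length_cons, List.range_succ_eq_map]
      simp only [List.foldl_cons, List.foldl_map, List.getD_cons_succ, List.getD_cons_zero,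
        List.zip_cons_cons, hrw]
      rw [ih h' (w * y)
        (Int.fmod (acc + Int.fmod (Int.fmod (a * b) order * Int.fmod (w * y ^ (0 + 1)) order) order) order)
        (Int.fmod (p * y) order) hlen' (by rw [Int.fmod_fmod, hq])]
      have hacc : Int.fmod (acc + Int.fmod (Int.fmod (a * b) order * Int.fmod (w * y ^ (0 + 1)) order) order) order
          = Int.fmod (acc + a * b * Int.fmod (p * y) order) order := by
        rw [zero_add, pow_one]
        calc Int.fmod (acc + Int.fmod (Int.fmod (a * b) order * Int.fmod (w * y) order) order) order
            = Int.fmod (acc + (a * b) * (w * y)) order := by rw [fmod_absorb_mul_left, fmod_absorb_mul_right, fmod_absorb_add_right]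
          _ = Int.fmod (acc + a * b * Int.fmod (p * y) order) order := by rw [← fmod_absorb_add_mul_right, ← hq]
      rw [hacc]

theorem bilinearmap_spec_aux (f h_ : List Int) (y order : Int)
    (hlen : f.length = h_.length) : bilinearmap f h_ y order = bilinearmap_alt f h_ y order := by
  unfold bilinearmap bilinearmap_alt
  simp only [py_add_mod, py_mul_mod, py_exp_mod, PySem.Int.mod]
  have h1 : ∀ j : Nat, (y : Int) ^ (j + 1) = (1 : Int) * y ^ (j + 1) := by
    intro j; ring
  calc (List.range f.length).foldl
        (fun var0 j =>
          Int.fmod (var0 + Int.fmod (Int.fmod ((f.getD j 0) * (h_.getD j 0)) order *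
            Int.fmod (y ^ (j + 1)) order) order) order) 0
      = (List.range f.length).foldl
        (fun var0 j =>
          Int.fmod (var0 + Int.fmod (Int.fmod ((f.getD j 0) * (h_.getD j 0)) order *
            Int.fmod ((1 : Int) * y ^ (j + 1)) order) order) order) 0 := by
        simp only [one_mul]
    _ = _ := loop_eq y order f h_ 1 0 1 hlen rfl

-- ===== VERDICT (by name: the statement is the Claim_ definition above) =====
theorem bilinearmap_spec : Claim_equal_bilinearmap := by
  intro f h_ y order _hdom hpre
  unfold Spec_bilinearmap
  exact bilinearmap_spec_aux f h_ y order hpre.1
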